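-- pv_equiv track=rewrite | github.com/inexxt/opetopes | Products.py | transitive_reflexive_closure
-- ===== SOURCE A (Python) =====
-- from typing import Set, List, Tuple, FrozenSet, Dict, Tuple
--
-- def transitive_reflexive_closure(relation: Set, new_elems: Set):
--     closed_rel = set()
--     closed_rel |= relation
--
--     while True:
--         added_elems = {(x, z) for (x, y) in new_elems for (w, z) in closed_rel if y == w}
--         added_elems |= {(x, z) for (x, y) in closed_rel for (w, z) in new_elems if y == w}
--
--         if not added_elems - closed_rel:
--             break
--         closed_rel |= added_elems
--         new_elems |= added_elems
--
--     closed_rel |= {(x, x) for (x, _) in closed_rel}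
--     closed_rel |= {(x, x) for (_, x) in closed_rel}
--
--     return closed_rel
-- ===== SOURCE B (Python) =====
-- # B: per-round composition via endpoint-indexed adjacency dicts (no inner scan over the
-- # whole relation), explicit worklists with membership sets. Same return value as A as a set.
-- # Note: A mutates its new_elems argument in place; B does not (equivalence is about the return value).
-- def transitive_reflexive_closure(relation, new_elems):
--     closed = []
--     closed_set = set()
--     for p in relation:
--         if p not in closed_set:
--             closed_set.add(p); closed.append(p)
--     new = []
--     new_set = set()
--     for p in new_elems:
--         if p not in new_set:
--             new_set.add(p); new.append(p)
--     while True: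
--         out = {}
--         for (w, z) in closed:
--             out.setdefault(w, []).append(z)
--         nout = {}
--         for (w, z) in new:
--             nout.setdefault(w, []).append(z)
--         added = []
--         added_set = set()
--         for (x, y) in new:
--             for z in out.get(y, ()):
--                 if (x, z) not in added_set:
--                     added_set.add((x, z)); added.append((x, z))
--         for (x, y) in closed:
--             for z in nout.get(y, ()):
--                 if (x, z) not in added_set:
--                     added_set.add((x, z)); added.append((x, z))
--         progress = False
--         for p in added:
--             if p not in closed_set:
--                 progress = True; closed_set.add(p); closed.append(p)
--             if p not in new_set:
--                 new_set.add(p); new.append(p)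
--         if not progress:
--             break
--     for (x, _) in list(closed):
--         if (x, x) not in closed_set:
--             closed_set.add((x, x)); closed.append((x, x))
--     for (_, x) in list(closed):
--         if (x, x) not in closed_set:
--             closed_set.add((x, x)); closed.append((x, x))
--     return closed_set
-- ===== Notes on version B (the rewrite author's own statement) =====
-- stated objective: faster
-- what changed: Each closure round composes via adjacency dicts indexed by edge endpoint (the inner scan over the whole relation disappears) and maintains explicit worklists with membership sets instead of recomputing set comprehensions over the full product.
import Mathlib
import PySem

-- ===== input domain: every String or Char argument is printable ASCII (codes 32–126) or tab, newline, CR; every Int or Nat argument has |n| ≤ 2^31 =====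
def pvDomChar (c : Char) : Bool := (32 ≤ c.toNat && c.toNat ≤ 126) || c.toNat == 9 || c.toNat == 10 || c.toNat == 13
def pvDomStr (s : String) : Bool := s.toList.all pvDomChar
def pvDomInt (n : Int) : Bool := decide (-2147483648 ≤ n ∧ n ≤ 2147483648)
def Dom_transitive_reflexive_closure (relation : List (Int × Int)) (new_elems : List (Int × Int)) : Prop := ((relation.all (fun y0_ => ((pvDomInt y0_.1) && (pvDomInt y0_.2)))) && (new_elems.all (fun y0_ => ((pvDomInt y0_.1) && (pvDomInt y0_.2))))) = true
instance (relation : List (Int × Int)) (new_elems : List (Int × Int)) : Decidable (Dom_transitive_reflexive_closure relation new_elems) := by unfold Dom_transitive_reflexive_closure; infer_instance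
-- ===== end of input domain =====

-- B replaces A's per-round O(|new|·|closed|) nested set-comprehension scans by endpoint-indexed
-- adjacency dicts (the inner scan over the whole relation disappears); same return value.
-- Python A mutates its new_elems argument in place, B does not: the equivalence proved here is
-- about the return value. Both while-loops are ported with the same fuel bound (a totality
-- guard only: the loop adds at least one of the ≤ 4(|relation|+|new_elems|)² candidate pairs
-- per iteration, so the fuel is never exhausted).

-- ===== PORT A =====
-- A's while-loop: closed_rel, new_elems as insertion-ordered sets.
def pvA_loop : Nat → List (Int × Int) → List (Int × Int) → List (Int × Int)
  | 0, C, _ => C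
  | f+1, C, N =>
    -- added_elems = {(x, z) for (x, y) in new_elems for (w, z) in closed_rel if y == w}
    -- added_elems |= {(x, z) for (x, y) in closed_rel for (w, z) in new_elems if y == w}
    let added := PySem.Set.union
        (N.foldl (fun s p => C.foldl (fun s q => if p.2 == q.1 then PySem.Set.add s (p.1, q.2) else s) s) PySem.Set.empty)
        (C.foldl (fun s p => N.foldl (fun s q => if p.2 == q.1 then PySem.Set.add s (p.1, q.2) else s) s) PySem.Set.empty)
    if (PySem.Set.diff added C).isEmpty then C
    else pvA_loop f (PySem.Set.union C added) (PySem.Set.union N added)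

-- closed_rel |= {(x, x) for (x, _) in closed_rel}   resp.   for (_, x)
def pvA_refl1 (C : List (Int × Int)) : List (Int × Int) :=
  PySem.Set.union C (PySem.Set.ofList (C.map (fun p => (p.1, p.1))))
def pvA_refl2 (C : List (Int × Int)) : List (Int × Int) :=
  PySem.Set.union C (PySem.Set.ofList (C.map (fun p => (p.2, p.2))))

def transitive_reflexive_closure (relation : List (Int × Int)) (new_elems : List (Int × Int)) : List (Int × Int) :=
  -- closed_rel = set(); closed_rel |= relation; then the loop, then the two reflexive unions
  pvA_refl2 (pvA_refl1 (pvA_loop (4*(relation.length + new_elems.length)^2 + 2)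
    (PySem.Set.union PySem.Set.empty relation) (PySem.Set.ofList new_elems)))

-- ===== PORT B =====
-- (In the Lean model the Python pair "list + membership set" kept in sync in Source B IS one
--  insertion-ordered PySem.Set, so each such pair is carried as the single list it denotes.)
-- out.setdefault(w, []).append(z) over a list of pairs
def pvB_index (l : List (Int × Int)) : PySem.Dict Int (List Int) :=
  l.foldl (fun d p => PySem.Dict.modify d p.1 [] (· ++ [p.2])) PySem.Dict.empty

def pvB_loop : Nat → List (Int × Int) → List (Int × Int) → List (Int × Int)
  | 0, C, _ => C
  | f+1, C, N =>
    let out := pvB_index C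
    let nout := pvB_index N
    -- the two candidate loops, inner iteration directly over the indexed successors
    let added := C.foldl (fun s p => (PySem.Dict.getD nout p.2 []).foldl (fun s z => PySem.Set.add s (p.1, z)) s)
        (N.foldl (fun s p => (PySem.Dict.getD out p.2 []).foldl (fun s z => PySem.Set.add s (p.1, z)) s) PySem.Set.empty)
    -- merge loop: append the genuinely new pairs, record progress
    let progress := added.any (fun p => !(PySem.Set.contains C p))
    let C' := added.foldl PySem.Set.add C
    let N' := added.foldl PySem.Set.add N
    if progress then pvB_loop f C' N' else C'

-- for (x, _) in list(closed): add (x, x) if missing   resp.   for (_, x)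
def pvB_refl1 (C : List (Int × Int)) : List (Int × Int) :=
  C.foldl (fun s p => PySem.Set.add s (p.1, p.1)) C
def pvB_refl2 (C : List (Int × Int)) : List (Int × Int) :=
  C.foldl (fun s p => PySem.Set.add s (p.2, p.2)) C

def transitive_reflexive_closure_alt (relation : List (Int × Int)) (new_elems : List (Int × Int)) : List (Int × Int) :=
  -- ordered dedup of the two inputs, then the indexed loop, then the two reflexive passes
  pvB_refl2 (pvB_refl1 (pvB_loop (4*(relation.length + new_elems.length)^2 + 2)
    (relation.foldl PySem.Set.add PySem.Set.empty) (new_elems.foldl PySem.Set.add PySem.Set.empty)))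

-- ===== PRECONDITION & SPEC =====
def Spec_transitive_reflexive_closure (relation : List (Int × Int)) (new_elems : List (Int × Int)) (out : List (Int × Int)) : Prop := out = transitive_reflexive_closure_alt relation new_elems
instance (relation : List (Int × Int)) (new_elems : List (Int × Int)) (out : List (Int × Int)) : Decidable (Spec_transitive_reflexive_closure relation new_elems out) := by unfold Spec_transitive_reflexive_closure; infer_instance

-- ===== CLAIM (what is proved, stated in full; the proofs are below) =====
def Claim_equal_transitive_reflexive_closure : Prop := ∀ (relation : List (Int × Int)) (new_elems : List (Int × Int)), Dom_transitive_reflexive_closure relation new_elems → Spec_transitive_reflexive_closure relation new_elems (transitive_reflexive_closure relation new_elems)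

-- ===== LEMMAS AND PROOFS =====

-- folding updates over a list is one update by the concatenation
theorem pv_foldl_update {α β : Type} [BEq α] (l : List β) (g : β → List α) (s : PySem.Set α) :
    l.foldl (fun s x => PySem.Set.update s (g x)) s = PySem.Set.update s (l.flatMap g) := by
  induction l generalizing s with
  | nil => simp [PySem.Set.update_nil]
  | cons x xs ih => simp [List.foldl_cons, ih, PySem.Set.update_append]

-- updating by the dedup of a list = updating by the list
theorem pv_update_ofList {α : Type} [BEq α] [LawfulBEq α] (s : PySem.Set α) (L : List α) :
    PySem.Set.update s (PySem.Set.ofList L) = PySem.Set.update s L := by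
  rw [PySem.Set.update_eq_append_filter, PySem.Set.update_eq_append_filter, PySem.Set.ofList_ofList]

def pvL1 (N C : List (Int × Int)) : List (Int × Int) :=
  N.flatMap (fun p => (C.filter (fun q => p.2 == q.1)).map (fun q => (p.1, q.2)))

-- A's comprehension, started from any accumulator, is one update
theorem pv_A_comp (N C : List (Int × Int)) (s : PySem.Set (Int × Int)) :
    N.foldl (fun s p => C.foldl (fun s q => if p.2 == q.1 then PySem.Set.add s (p.1, q.2) else s) s) s
      = PySem.Set.update s (pvL1 N C) := by
  unfold pvL1
  rw [← pv_foldl_update]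
  refine PySem.List.foldl_congr_mem _ _ _ _ (fun acc p _ => ?_)
  rw [PySem.List.foldl_if_eq_foldl_filter, ← PySem.Set.update_map_eq_foldl_add]

-- B's indexed loop, started from any accumulator, is the same update
theorem pv_B_comp (N C : List (Int × Int)) (s : PySem.Set (Int × Int)) :
    N.foldl (fun s p => (PySem.Dict.getD (pvB_index C) p.2 []).foldl (fun s z => PySem.Set.add s (p.1, z)) s) s
      = PySem.Set.update s (pvL1 N C) := by
  unfold pvL1
  rw [← pv_foldl_update]
  refine PySem.List.foldl_congr_mem _ _ _ _ (fun acc p _ => ?_)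
  have hidx : PySem.Dict.getD (pvB_index C) p.2 [] = (C.filter (fun q => q.1 == p.2)).map (·.2) := by
    simpa [pvB_index] using PySem.Dict.getD_foldl_modify_append (l := C) (d := PySem.Dict.empty) (c := p.2)
  have hfl : C.filter (fun q => q.1 == p.2) = C.filter (fun q => p.2 == q.1) :=
    List.filter_congr (fun q _ => by
      by_cases h : q.1 = p.2
      · simp [h]
      · simp [h, Ne.symm h])
  rw [hidx, hfl, List.foldl_map, ← PySem.Set.update_map_eq_foldl_add]

-- one round produces the same candidate set in both ports
theorem pv_added_eq (N C : List (Int × Int)) :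
    PySem.Set.union
        (N.foldl (fun s p => C.foldl (fun s q => if p.2 == q.1 then PySem.Set.add s (p.1, q.2) else s) s) PySem.Set.empty)
        (C.foldl (fun s p => N.foldl (fun s q => if p.2 == q.1 then PySem.Set.add s (p.1, q.2) else s) s) PySem.Set.empty)
      = C.foldl (fun s p => (PySem.Dict.getD (pvB_index N) p.2 []).foldl (fun s z => PySem.Set.add s (p.1, z)) s)
        (N.foldl (fun s p => (PySem.Dict.getD (pvB_index C) p.2 []).foldl (fun s z => PySem.Set.add s (p.1, z)) s) PySem.Set.empty) := by
  rw [pv_A_comp, pv_A_comp, pv_B_comp, pv_B_comp]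
  show PySem.Set.update (PySem.Set.update PySem.Set.empty (pvL1 N C)) (PySem.Set.ofList (pvL1 C N)) = _
  rw [pv_update_ofList]

-- an update by already-present elements is the identity
theorem pv_update_of_subset {α : Type} [BEq α] [LawfulBEq α] (s : PySem.Set α) (L : List α)
    (h : ∀ x ∈ L, x ∈ s) : PySem.Set.update s L = s := by
  rw [PySem.Set.update_eq_append_filter]
  have : (PySem.Set.ofList L).filter (fun y => !(PySem.Set.contains s y)) = [] := by
    rw [List.filter_eq_nil_iff]
    intro a ha
    have hm : a ∈ s := h a ((PySem.Set.mem_ofList L a).mp ha)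
    simp [hm]
  rw [this, List.append_nil]

theorem pv_loop_eq (f : Nat) (C N : List (Int × Int)) : pvA_loop f C N = pvB_loop f C N := by
  induction f generalizing C N with
  | zero => rfl
  | succ f ih =>
    simp only [pvA_loop, pvB_loop]
    rw [← pv_added_eq N C]
    set added := PySem.Set.union
        (N.foldl (fun s p => C.foldl (fun s q => if p.2 == q.1 then PySem.Set.add s (p.1, q.2) else s) s) PySem.Set.empty)
        (C.foldl (fun s p => N.foldl (fun s q => if p.2 == q.1 then PySem.Set.add s (p.1, q.2) else s) s) PySem.Set.empty) with hadd
    have hdiff : PySem.Set.diff added C = added.filter (fun x => !(PySem.Set.contains C x)) := rfl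
    by_cases hprog : added.any (fun p => !(PySem.Set.contains C p)) = true
    · obtain ⟨p, hp, hpc⟩ := List.any_eq_true.mp hprog
      have hne : (PySem.Set.diff added C).isEmpty = false := by
        rw [hdiff]
        refine Bool.eq_false_iff.mpr (fun hcontra => ?_)
        have := List.isEmpty_iff.mp hcontra
        exact (List.ne_nil_of_mem (List.mem_filter.mpr ⟨hp, hpc⟩)) this
      simp only [hne, hprog, Bool.false_eq_true, if_false, if_true]
      exact ih _ _
    · have hall : ∀ p ∈ added, p ∈ C := by
        intro p hp
        by_contra hc
        refine hprog (List.any_eq_true.mpr ⟨p, hp, ?_⟩)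
        simp [hc]
      have hemp : (PySem.Set.diff added C).isEmpty = true := by
        rw [hdiff, List.isEmpty_iff, List.filter_eq_nil_iff]
        intro a ha
        simpa using hall a ha
      simp only [hemp, Bool.eq_false_iff.mpr hprog, Bool.false_eq_true, if_false, if_true]
      exact (pv_update_of_subset C added hall).symm

-- the two reflexive passes agree
theorem pv_refl1_eq (C : List (Int × Int)) : pvA_refl1 C = pvB_refl1 C := by
  unfold pvA_refl1 pvB_refl1
  show PySem.Set.update C (PySem.Set.ofList (C.map (fun p => (p.1, p.1)))) = _
  rw [pv_update_ofList, PySem.Set.update_map_eq_foldl_add]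

theorem pv_refl2_eq (C : List (Int × Int)) : pvA_refl2 C = pvB_refl2 C := by
  unfold pvA_refl2 pvB_refl2
  show PySem.Set.update C (PySem.Set.ofList (C.map (fun p => (p.2, p.2)))) = _
  rw [pv_update_ofList, PySem.Set.update_map_eq_foldl_add]

-- ===== VERDICT (by name: the statement is the Claim_ definition above) =====
theorem transitive_reflexive_closure_spec : Claim_equal_transitive_reflexive_closure := by
  intro relation new_elems _
  show transitive_reflexive_closure relation new_elems = transitive_reflexive_closure_alt relation new_elems
  unfold transitive_reflexive_closure transitive_reflexive_closure_alt
  rw [pv_loop_eq, pv_refl1_eq, pv_refl2_eq]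
  rfl
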